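-- pv_equiv track=rewrite | github.com/AlejandroMus/dfn-ranking-unranking | dfn_cuts_rank_unrank.py | _rank_in_group_from_ext
-- ===== SOURCE A (Python) =====
-- from math import comb
--
-- def _rank_in_group_from_ext(L, R, m, Lext, Rext, comparator_name):
--     """Compute the intra-block rank (rem) from the chosen extensions, mirroring the unrank loops."""
--     y_s = m - 1
--     if y_s <= 1:
--         return 0
--     left_first = (comparator_name in ("lex1", "xy", "engine"))
--     rem = 0
--     ell_prev = r_prev = 0
--     # iterate same search order, summing counts for candidates strictly before the chosen pair
--     for t in range(y_s-1, 0, -1):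
--         remaining = t - 1
--         target_ell = Lext[t]
--         target_rr  = Rext[t]
--         if left_first:
--             # scan ell desc, rr asc
--             for ell in range(L, ell_prev - 1, -1):
--                 for rr in range(r_prev, R + 1):
--                     if (ell, rr) == (target_ell, target_rr):
--                         ell_prev, r_prev = ell, rr
--                         break
--                     cnt = comb((L - ell) + remaining, remaining) * comb((R - rr) + remaining, remaining)
--                     rem += cnt
--                 else:
--                     continue
--                 break
--         else:
--             # scan rr asc, ell desc
--             for rr in range(r_prev, R + 1):
--                 for ell in range(L, ell_prev - 1, -1):
--                     if (ell, rr) == (target_ell, target_rr):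
--                         ell_prev, r_prev = ell, rr
--                         break
--                     cnt = comb((L - ell) + remaining, remaining) * comb((R - rr) + remaining, remaining)
--                     rem += cnt
--                 else:
--                     continue
--                 break
--     return rem
-- ===== SOURCE B (Python) =====
-- from math import comb
--
-- def _hs(n, k):
--     # sum_{i=0}^{n} comb(i + k, k) = comb(n + k + 1, k + 1); 0 for empty range (n < 0)
--     return comb(n + k + 1, k + 1) if n >= 0 else 0
--
-- def _rank_in_group_from_ext(L, R, m, Lext, Rext, comparator_name):
--     """Closed-form intra-block rank: each inner 2D scan of the unrank loop is replaced
--     by hockey-stick range sums of binomials."""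
--     y_s = m - 1
--     if y_s <= 1:
--         return 0
--     left_first = (comparator_name in ("lex1", "xy", "engine"))
--     rem = 0
--     lp = rp = 0
--     for t in range(y_s - 1, 0, -1):
--         k = t - 1
--         te, tr = Lext[t], Rext[t]
--         SL = _hs(L - lp, k)   # sum over ell in [lp, L] of comb((L-ell)+k, k)
--         SR = _hs(R - rp, k)   # sum over rr  in [rp, R] of comb((R-rr)+k, k)
--         if lp <= te <= L and rp <= tr <= R:
--             if left_first:
--                 rem += _hs(L - te - 1, k) * SR + comb((L - te) + k, k) * (SR - _hs(R - tr, k))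
--             else:
--                 rem += (SR - _hs(R - tr, k)) * SL + comb((R - tr) + k, k) * _hs(L - te - 1, k)
--             lp, rp = te, tr
--         else:
--             rem += SL * SR   # the scan never matches: every candidate pair is counted
--     return rem
-- ===== Notes on version B (the rewrite author's own statement) =====
-- stated objective: faster
-- what changed: Each inner 2D scan over candidate (ell, rr) pairs is replaced by closed-form hockey-stick range sums of binomials, so every extension step costs O(1) big-int operations instead of an O(L*R) candidate walk.
import Mathlib
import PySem

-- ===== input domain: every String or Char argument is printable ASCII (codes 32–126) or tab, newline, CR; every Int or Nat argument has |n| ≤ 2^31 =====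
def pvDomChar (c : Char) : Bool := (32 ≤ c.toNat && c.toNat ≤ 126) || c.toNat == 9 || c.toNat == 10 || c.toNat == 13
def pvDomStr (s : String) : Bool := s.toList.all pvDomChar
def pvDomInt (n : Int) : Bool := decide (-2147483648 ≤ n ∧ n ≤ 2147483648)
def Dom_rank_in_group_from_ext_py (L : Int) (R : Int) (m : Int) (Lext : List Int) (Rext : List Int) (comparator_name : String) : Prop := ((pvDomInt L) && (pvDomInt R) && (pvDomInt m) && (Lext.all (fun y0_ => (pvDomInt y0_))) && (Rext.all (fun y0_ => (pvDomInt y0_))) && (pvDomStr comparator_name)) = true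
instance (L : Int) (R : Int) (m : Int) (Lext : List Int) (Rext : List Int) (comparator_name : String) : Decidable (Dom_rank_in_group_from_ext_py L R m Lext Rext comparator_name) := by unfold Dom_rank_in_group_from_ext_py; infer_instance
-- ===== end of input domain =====

-- B replaces A's nested 2D candidate scans by closed-form hockey-stick range sums of
-- binomials (one O(1) formula per extension step instead of an O(L*R) scan).

-- math.comb(n, k); exact for 0 ≤ n and 0 ≤ k, the only arguments either program reaches
def pyComb (n k : Int) : Int := (Nat.choose n.toNat k.toNat : Int)

-- ===== PORT A =====
-- inner loop: scan the candidate list, summing f x until hit x; returns (sum, hit element)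
def scanIn (f : Int → Int) (hit : Int → Bool) : List Int → Int × Option Int
  | [] => (0, none)
  | x :: rest =>
    if hit x then (0, some x)
    else
      let p := scanIn f hit rest
      (f x + p.1, p.2)

-- outer loop: run the inner scan g per element, summing; stop when g reports a hit
def scanOut (g : Int → Int × Option Int) : List Int → Int × Option (Int × Int)
  | [] => (0, none)
  | x :: rest =>
    match g x with
    | (s, some y) => (s, some (x, y))
    | (s, none) =>
      let p := scanOut g rest
      (s + p.1, p.2)

-- one iteration of A's 'for t in range(y_s-1, 0, -1)' loop; state = (rem, ell_prev, r_prev)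
def stepA (L R : Int) (left_first : Bool) (Lext Rext : List Int)
    (st : Int × Int × Int) (t : Int) : Int × Int × Int :=
  let remaining := t - 1
  let te := PySem.List.pyGetD Lext t 0
  let tr := PySem.List.pyGetD Rext t 0
  if left_first then
    match scanOut
        (fun ell => scanIn
          (fun rr => pyComb ((L - ell) + remaining) remaining * pyComb ((R - rr) + remaining) remaining)
          (fun rr => ell == te && rr == tr)
          (PySem.List.pyRange st.2.2 (R + 1) 1))
        (PySem.List.pyRange L (st.2.1 - 1) (-1)) with
    | (s, some (ell, rr)) => (st.1 + s, ell, rr)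
    | (s, none) => (st.1 + s, st.2.1, st.2.2)
  else
    match scanOut
        (fun rr => scanIn
          (fun ell => pyComb ((L - ell) + remaining) remaining * pyComb ((R - rr) + remaining) remaining)
          (fun ell => ell == te && rr == tr)
          (PySem.List.pyRange L (st.2.1 - 1) (-1)))
        (PySem.List.pyRange st.2.2 (R + 1) 1) with
    | (s, some (rr, ell)) => (st.1 + s, ell, rr)
    | (s, none) => (st.1 + s, st.2.1, st.2.2)

def rank_in_group_from_ext_py (L : Int) (R : Int) (m : Int) (Lext : List Int) (Rext : List Int) (comparator_name : String) : Int :=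
  let y_s := m - 1
  if y_s ≤ 1 then 0
  else
    let left_first := comparator_name == "lex1" || comparator_name == "xy" || comparator_name == "engine"
    ((PySem.List.pyRange (y_s - 1) 0 (-1)).foldl (stepA L R left_first Lext Rext) (0, 0, 0)).1

-- ===== PORT B =====
-- _hs(n, k) = sum_{i=0}^{n} comb(i+k, k) = comb(n+k+1, k+1), 0 when n < 0
def hsB (n k : Int) : Int := if 0 ≤ n then pyComb (n + k + 1) (k + 1) else 0

-- one iteration of B's loop; state = (rem, lp, rp)
def stepB (L R : Int) (left_first : Bool) (Lext Rext : List Int)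
    (st : Int × Int × Int) (t : Int) : Int × Int × Int :=
  let k := t - 1
  let te := PySem.List.pyGetD Lext t 0
  let tr := PySem.List.pyGetD Rext t 0
  let SL := hsB (L - st.2.1) k
  let SR := hsB (R - st.2.2) k
  if st.2.1 ≤ te ∧ te ≤ L ∧ st.2.2 ≤ tr ∧ tr ≤ R then
    if left_first then
      (st.1 + (hsB (L - te - 1) k * SR + pyComb ((L - te) + k) k * (SR - hsB (R - tr) k)), te, tr)
    else
      (st.1 + ((SR - hsB (R - tr) k) * SL + pyComb ((R - tr) + k) k * hsB (L - te - 1) k), te, tr)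
  else
    (st.1 + SL * SR, st.2.1, st.2.2)

def rank_in_group_from_ext_py_alt (L : Int) (R : Int) (m : Int) (Lext : List Int) (Rext : List Int) (comparator_name : String) : Int :=
  let y_s := m - 1
  if y_s ≤ 1 then 0
  else
    let left_first := comparator_name == "lex1" || comparator_name == "xy" || comparator_name == "engine"
    ((PySem.List.pyRange (y_s - 1) 0 (-1)).foldl (stepB L R left_first Lext Rext) (0, 0, 0)).1

-- ===== PRECONDITION & SPEC =====
-- Pre_ excludes exactly the inputs where Python A raises IndexError: m-1 > 1 and an index
-- t ≤ m-2 reaches past the end of Lext or Rext.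
def Pre_rank_in_group_from_ext_py (L : Int) (R : Int) (m : Int) (Lext : List Int) (Rext : List Int) (comparator_name : String) : Prop :=
  m - 1 ≤ 1 ∨ (m - 1 ≤ (Lext.length : Int) ∧ m - 1 ≤ (Rext.length : Int))
instance (L : Int) (R : Int) (m : Int) (Lext : List Int) (Rext : List Int) (comparator_name : String) : Decidable (Pre_rank_in_group_from_ext_py L R m Lext Rext comparator_name) := by unfold Pre_rank_in_group_from_ext_py; infer_instance

def pvWitness_rank_in_group_from_ext_py : Int × Int × Int × List Int × List Int × String :=
  (2, 2, 4, [0, 1, 2], [0, 1, 2], "xy")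

def Spec_rank_in_group_from_ext_py (L : Int) (R : Int) (m : Int) (Lext : List Int) (Rext : List Int) (comparator_name : String) (out : Int) : Prop := out = rank_in_group_from_ext_py_alt L R m Lext Rext comparator_name
instance (L : Int) (R : Int) (m : Int) (Lext : List Int) (Rext : List Int) (comparator_name : String) (out : Int) : Decidable (Spec_rank_in_group_from_ext_py L R m Lext Rext comparator_name out) := by unfold Spec_rank_in_group_from_ext_py; infer_instance

-- ===== CLAIM (what is proved, stated in full; the proofs are below) =====
def Claim_equal_rank_in_group_from_ext_py : Prop := ∀ (L : Int) (R : Int) (m : Int) (Lext : List Int) (Rext : List Int) (comparator_name : String), Dom_rank_in_group_from_ext_py L R m Lext Rext comparator_name → Pre_rank_in_group_from_ext_py L R m Lext Rext comparator_name → Spec_rank_in_group_from_ext_py L R m Lext Rext comparator_name (rank_in_group_from_ext_py L R m Lext Rext comparator_name)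

-- ===== LEMMAS AND PROOFS =====

-- Pascal's rule packaged for the hockey-stick function hsB
theorem hsB_pascal (n k : Int) (hn : 0 ≤ n) (hk : 0 ≤ k) :
    hsB n k = pyComb (n + k) k + hsB (n - 1) k := by
  unfold hsB pyComb
  rcases eq_or_lt_of_le hn with h0 | h0
  · rw [if_pos hn, if_neg (by omega : ¬ (0:Int) ≤ n - 1)]
    rw [show (n + k + 1).toNat = k.toNat + 1 from by omega,
        show (n + k).toNat = k.toNat from by omega,
        show (k + 1).toNat = k.toNat + 1 from by omega]
    simp [Nat.choose_self]
  · rw [if_pos hn, if_pos (by omega : (0:Int) ≤ n - 1)]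
    rw [show (n + k + 1).toNat = (n.toNat - 1 + k.toNat) + 1 + 1 from by omega,
        show (k + 1).toNat = k.toNat + 1 from by omega,
        show (n + k).toNat = (n.toNat - 1 + k.toNat) + 1 from by omega,
        show (n - 1 + k + 1).toNat = (n.toNat - 1 + k.toNat) + 1 from by omega]
    exact_mod_cast Nat.choose_succ_succ' (n.toNat - 1 + k.toNat + 1) k.toNat

-- hockey stick: full range sum of binomial tails
theorem sum_comb_asc (c k : Int) (hk : 0 ≤ k) :
    ∀ (n : Nat) (a : Int), (c + 1 - a).toNat = n →
      ((PySem.List.pyRange a (c + 1) 1).map (fun x => pyComb (c - x + k) k)).sum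
        = hsB (c - a) k
  | 0, a, hn => by
      rw [PySem.List.pyRange_one_eq_nil (by omega : c + 1 ≤ a)]
      simp only [List.map_nil, List.sum_nil, hsB]
      rw [if_neg (by omega : ¬ (0:Int) ≤ c - a)]
  | (n + 1), a, hn => by
      rw [PySem.List.pyRange_one_cons (by omega : a < c + 1)]
      simp only [List.map_cons, List.sum_cons]
      rw [sum_comb_asc c k hk n (a + 1) (by omega)]
      rw [hsB_pascal (c - a) k (by omega) hk,
          show c - (a + 1) = c - a - 1 from by ring,
          show c - a + k = (c - a) + k from rfl]

theorem sum_comb_full (c k : Int) (hk : 0 ≤ k) (a : Int) :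
    ((PySem.List.pyRange a (c + 1) 1).map (fun x => pyComb (c - x + k) k)).sum
      = hsB (c - a) k :=
  sum_comb_asc c k hk (c + 1 - a).toNat a rfl

theorem sum_comb_partial (c k a m : Int) (hk : 0 ≤ k) (ham : a ≤ m) (hm : m ≤ c + 1) :
    ((PySem.List.pyRange a m 1).map (fun x => pyComb (c - x + k) k)).sum
      = hsB (c - a) k - hsB (c - m) k := by
  have hsplit := PySem.List.pyRange_one_append a m (c + 1) ham hm
  have h1 := sum_comb_full c k hk a
  have h2 := sum_comb_full c k hk m
  rw [hsplit, List.map_append, List.sum_append, h2] at h1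
  omega

-- a countdown-range sum is the corresponding ascending-range sum
theorem sum_map_desc (f : Int → Int) (a b : Int) :
    ((PySem.List.pyRange a b (-1)).map f).sum
      = ((PySem.List.pyRange (b + 1) (a + 1) 1).map f).sum := by
  rw [PySem.List.pyRange_neg_one_eq_reverse, List.map_reverse, List.sum_reverse]

-- characterisations of the two scan loops
theorem scanIn_no_hit (f : Int → Int) (hit : Int → Bool) (l : List Int)
    (h : ∀ x ∈ l, hit x = false) : scanIn f hit l = ((l.map f).sum, none) := by
  induction l with
  | nil => simp [scanIn]
  | cons x rest ih =>
      simp only [scanIn, h x (by simp), Bool.false_eq_true, if_false,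
        ih (fun y hy => h y (by simp [hy])), List.map_cons, List.sum_cons]

theorem scanIn_split (f : Int → Int) (hit : Int → Bool) (l1 : List Int) (x0 : Int) (l2 : List Int)
    (h1 : ∀ x ∈ l1, hit x = false) (h0 : hit x0 = true) :
    scanIn f hit (l1 ++ x0 :: l2) = ((l1.map f).sum, some x0) := by
  induction l1 with
  | nil => simp [scanIn, h0]
  | cons x rest ih =>
      simp only [List.cons_append, scanIn, h1 x (by simp), Bool.false_eq_true, if_false,
        ih (fun y hy => h1 y (by simp [hy])), List.map_cons, List.sum_cons]

theorem scanOut_no_hit (g : Int → Int × Option Int) (l : List Int)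
    (h : ∀ x ∈ l, (g x).2 = none) :
    scanOut g l = ((l.map (fun x => (g x).1)).sum, none) := by
  induction l with
  | nil => simp [scanOut]
  | cons x rest ih =>
      have hx : g x = ((g x).1, none) := by
        have := h x (by simp); exact Prod.ext rfl this
      simp only [scanOut, List.map_cons, List.sum_cons]
      rw [hx]
      simp only [ih (fun y hy => h y (by simp [hy]))]

theorem scanOut_split (g : Int → Int × Option Int) (l1 : List Int) (x0 : Int) (l2 : List Int)
    (y0 : Int) (h1 : ∀ x ∈ l1, (g x).2 = none) (h0 : (g x0).2 = some y0) :
    scanOut g (l1 ++ x0 :: l2)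
      = ((l1.map (fun x => (g x).1)).sum + (g x0).1, some (x0, y0)) := by
  induction l1 with
  | nil =>
      have hx : g x0 = ((g x0).1, some y0) := Prod.ext rfl h0
      simp only [List.nil_append, scanOut]
      rw [hx]
      simp
  | cons x rest ih =>
      have hx : g x = ((g x).1, none) := Prod.ext rfl (h1 x (by simp))
      simp only [List.cons_append, scanOut, List.map_cons, List.sum_cons]
      rw [hx]
      simp only [ih (fun y hy => h1 y (by simp [hy]))]
      rw [Prod.mk.injEq]
      exact ⟨by ring, rfl⟩

theorem pyRange_neg_one_append (a m b : Int) (h1 : b ≤ m) (h2 : m ≤ a) :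
    PySem.List.pyRange a b (-1)
      = PySem.List.pyRange a m (-1) ++ PySem.List.pyRange m b (-1) := by
  rw [PySem.List.pyRange_neg_one_eq_reverse a b, PySem.List.pyRange_neg_one_eq_reverse a m,
      PySem.List.pyRange_neg_one_eq_reverse m b,
      PySem.List.pyRange_one_append (b + 1) (m + 1) (a + 1) (by omega) (by omega),
      List.reverse_append]

theorem step_eq (L R : Int) (lf : Bool) (Lext Rext : List Int)
    (st : Int × Int × Int) (t : Int) (ht : 1 ≤ t) :
    stepA L R lf Lext Rext st t = stepB L R lf Lext Rext st t := by
  obtain ⟨rem, lp, rp⟩ := st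
  unfold stepA stepB
  dsimp only
  set k := t - 1 with hkdef
  have hk : 0 ≤ k := by omega
  set te := PySem.List.pyGetD Lext t 0 with hte
  set tr := PySem.List.pyGetD Rext t 0 with htr
  -- inner-scan characterisation: when the target pair cannot be hit, full row sum
  have hginner : ∀ ell : Int, ¬ (ell = te ∧ rp ≤ tr ∧ tr ≤ R) →
      scanIn (fun rr => pyComb ((L - ell) + k) k * pyComb ((R - rr) + k) k)
          (fun rr => ell == te && rr == tr) (PySem.List.pyRange rp (R + 1) 1)
        = (pyComb ((L - ell) + k) k * hsB (R - rp) k, none) := by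
    intro ell hne
    rw [scanIn_no_hit _ _ _ ?_]
    · rw [List.sum_map_mul_left, sum_comb_full R k hk rp]
    · intro rr hrr
      by_cases he : ell = te
      · have hmem := PySem.List.mem_pyRange_one.mp hrr
        have : rr ≠ tr := by
          intro hcontra; exact hne ⟨he, by omega, by omega⟩
        simp [this]
      · simp [he]
  -- inner-scan characterisation for the rr-outer orientation
  have hginner2 : ∀ rr : Int, ¬ (rr = tr ∧ lp ≤ te ∧ te ≤ L) →
      scanIn (fun ell => pyComb ((L - ell) + k) k * pyComb ((R - rr) + k) k)
          (fun ell => ell == te && rr == tr) (PySem.List.pyRange L (lp - 1) (-1))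
        = (hsB (L - lp) k * pyComb ((R - rr) + k) k, none) := by
    intro rr hne
    rw [scanIn_no_hit _ _ _ ?_]
    · rw [List.sum_map_mul_right, sum_map_desc,
          show lp - 1 + 1 = lp from by ring, sum_comb_full L k hk lp]
    · intro ell hell
      by_cases he : rr = tr
      · have hmem := PySem.List.mem_pyRange_neg_one.mp hell
        have : ell ≠ te := by
          intro hcontra; exact hne ⟨he, by omega, by omega⟩
        simp [this]
      · simp [he]
  by_cases hcond : lp ≤ te ∧ te ≤ L ∧ rp ≤ tr ∧ tr ≤ R
  · rw [if_pos hcond]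
    obtain ⟨h1, h2, h3, h4⟩ := hcond
    have hOsplit : PySem.List.pyRange L (lp - 1) (-1)
        = PySem.List.pyRange L te (-1) ++ te :: PySem.List.pyRange (te - 1) (lp - 1) (-1) := by
      rw [pyRange_neg_one_append L te (lp - 1) (by omega) (by omega),
          PySem.List.pyRange_neg_one_cons (by omega : lp - 1 < te)]
    have hIsplit : PySem.List.pyRange rp (R + 1) 1
        = PySem.List.pyRange rp tr 1 ++ tr :: PySem.List.pyRange (tr + 1) (R + 1) 1 := by
      rw [PySem.List.pyRange_one_append rp tr (R + 1) (by omega) (by omega),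
          PySem.List.pyRange_one_cons (by omega : tr < R + 1)]
    cases lf with
    | true =>
      simp only [reduceIte]
      have hgte : scanIn (fun rr => pyComb ((L - te) + k) k * pyComb ((R - rr) + k) k)
          (fun rr => te == te && rr == tr) (PySem.List.pyRange rp (R + 1) 1)
          = (pyComb ((L - te) + k) k * (hsB (R - rp) k - hsB (R - tr) k), some tr) := by
        rw [hIsplit, scanIn_split _ _ _ _ _ ?_ (by simp)]
        · rw [List.sum_map_mul_left, sum_comb_partial R k rp tr hk (by omega) (by omega)]
        · intro rr hrr
          have := PySem.List.mem_pyRange_one.mp hrr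
          have hne : rr ≠ tr := by omega
          simp [hne]
      rw [hOsplit, scanOut_split _ _ te _ tr ?_ (by rw [hgte])]
      · rw [List.map_congr_left (g := fun ell => pyComb ((L - ell) + k) k * hsB (R - rp) k) ?_]
        · rw [hgte, List.sum_map_mul_right, sum_map_desc, sum_comb_full L k hk (te + 1)]
          simp only [Prod.mk.injEq, and_true]
          rw [show L - (te + 1) = L - te - 1 from by ring]
        · intro ell hell
          have hmem := PySem.List.mem_pyRange_neg_one.mp hell
          exact congrArg Prod.fst (hginner ell (by rintro ⟨he, -⟩; omega))
      · intro ell hell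
        have hmem := PySem.List.mem_pyRange_neg_one.mp hell
        exact congrArg Prod.snd (hginner ell (by rintro ⟨he, -⟩; omega)) |>.trans rfl
    | false =>
      simp only [Bool.false_eq_true, if_false]
      have hgtr : scanIn (fun ell => pyComb ((L - ell) + k) k * pyComb ((R - tr) + k) k)
          (fun ell => ell == te && tr == tr) (PySem.List.pyRange L (lp - 1) (-1))
          = (hsB (L - te - 1) k * pyComb ((R - tr) + k) k, some te) := by
        rw [hOsplit, scanIn_split _ _ _ _ _ ?_ (by simp)]
        · rw [List.sum_map_mul_right, sum_map_desc, sum_comb_full L k hk (te + 1),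
              show L - (te + 1) = L - te - 1 from by ring]
        · intro ell hell
          have := PySem.List.mem_pyRange_neg_one.mp hell
          have hne : ell ≠ te := by omega
          simp [hne]
      rw [hIsplit, scanOut_split _ _ tr _ te ?_ (by rw [hgtr])]
      · rw [List.map_congr_left (g := fun rr => hsB (L - lp) k * pyComb ((R - rr) + k) k) ?_]
        · rw [hgtr, List.sum_map_mul_left, sum_comb_partial R k rp tr hk (by omega) (by omega)]
          simp only [Prod.mk.injEq, and_true]
          ring
        · intro rr hrr
          have hmem := PySem.List.mem_pyRange_one.mp hrr
          exact congrArg Prod.fst (hginner2 rr (by rintro ⟨he, -⟩; omega))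
      · intro rr hrr
        have hmem := PySem.List.mem_pyRange_one.mp hrr
        exact congrArg Prod.snd (hginner2 rr (by rintro ⟨he, -⟩; omega)) |>.trans rfl
  · rw [if_neg hcond]
    cases lf with
    | true =>
      simp only [reduceIte]
      rw [scanOut_no_hit _ _ ?_]
      · rw [List.map_congr_left (g := fun ell => pyComb ((L - ell) + k) k * hsB (R - rp) k) ?_]
        · rw [List.sum_map_mul_right, sum_map_desc, show lp - 1 + 1 = lp from by ring,
              sum_comb_full L k hk lp]
        · intro ell hell
          have hmem := PySem.List.mem_pyRange_neg_one.mp hell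
          exact congrArg Prod.fst (hginner ell (by rintro ⟨he, h3, h4⟩; exact hcond ⟨by omega, by omega, h3, h4⟩))
      · intro ell hell
        have hmem := PySem.List.mem_pyRange_neg_one.mp hell
        exact congrArg Prod.snd (hginner ell (by rintro ⟨he, h3, h4⟩; exact hcond ⟨by omega, by omega, h3, h4⟩)) |>.trans rfl
    | false =>
      simp only [Bool.false_eq_true, if_false]
      rw [scanOut_no_hit _ _ ?_]
      · rw [List.map_congr_left (g := fun rr => hsB (L - lp) k * pyComb ((R - rr) + k) k) ?_]
        · rw [List.sum_map_mul_left, sum_comb_full R k hk rp]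
        · intro rr hrr
          have hmem := PySem.List.mem_pyRange_one.mp hrr
          exact congrArg Prod.fst (hginner2 rr (by rintro ⟨he, h1, h2⟩; exact hcond ⟨h1, h2, by omega, by omega⟩))
      · intro rr hrr
        have hmem := PySem.List.mem_pyRange_one.mp hrr
        exact congrArg Prod.snd (hginner2 rr (by rintro ⟨he, h1, h2⟩; exact hcond ⟨h1, h2, by omega, by omega⟩)) |>.trans rfl

-- ===== VERDICT (by name: the statement is the Claim_ definition above) =====
theorem rank_in_group_from_ext_py_spec : Claim_equal_rank_in_group_from_ext_py := by
  intro L R m Lext Rext cn _ _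
  unfold Spec_rank_in_group_from_ext_py rank_in_group_from_ext_py rank_in_group_from_ext_py_alt
  simp only []
  by_cases h : m - 1 ≤ 1
  · simp [h]
  · simp only [h, if_false]
    congr 1
    apply PySem.List.foldl_congr_mem
    intro st t htmem
    have := (PySem.List.mem_pyRange_neg_one.mp htmem).1
    exact step_eq L R _ Lext Rext st t (by omega)
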